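-- pv_equiv track=rewrite | github.com/ofirgaash1/sonar-test | explore/app/routes/_helpers.py | _build_new_window
-- ===== SOURCE A (Python) =====
-- def _build_new_window(words: list, start_seg: int, end_seg: int) -> tuple[list[tuple[int, str, int]], str]:
--     seg_idx = 0
--     new_window = []
--     for wi, w in enumerate(words or []):
--         try:
--             t = str(w.get('word') or '')
--         except Exception:
--             t = ''
--         if t == '\n':
--             seg_idx += 1
--             continue
--         if seg_idx >= start_seg and seg_idx <= end_seg:
--             new_window.append((wi, t, seg_idx))
--     new_transcript = ' '.join(t for _, t, _ in new_window if t and (not str(t).isspace()))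
--     return new_window, new_transcript
-- ===== SOURCE B (Python) =====
-- def _build_new_window(words: list, start_seg: int, end_seg: int) -> tuple[list[tuple[int, str, int]], str]:
--     # Phase 1: annotate — extract each word's text, then compute each word's
--     # segment index as the running count of newline-words strictly before it.
--     texts = []
--     for w in (words or []):
--         try:
--             texts.append(str(w.get('word') or ''))
--         except Exception:
--             texts.append('')
--     segs = []
--     acc = 0
--     for t in texts:
--         segs.append(acc)
--         acc += 1 if t == '\n' else 0
--     # Phase 2: filter — select the non-newline words whose segment is in range.
--     new_window = [(wi, t, s)
--                   for wi, (t, s) in enumerate(zip(texts, segs))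
--                   if t != '\n' and start_seg <= s <= end_seg]
--     new_transcript = ' '.join(t for _, t, _ in new_window if t and not t.isspace())
--     return new_window, new_transcript
-- ===== Notes on version B (the rewrite author's own statement) =====
-- stated objective: alternative
-- what changed: Replaces A's single stateful loop (mutable seg_idx with continue and conditional append) by an annotate-then-filter decomposition: one pass extracts texts, one scan assigns each word its prefix newline count as segment index, and a comprehension selects the window entries.
import Mathlib
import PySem

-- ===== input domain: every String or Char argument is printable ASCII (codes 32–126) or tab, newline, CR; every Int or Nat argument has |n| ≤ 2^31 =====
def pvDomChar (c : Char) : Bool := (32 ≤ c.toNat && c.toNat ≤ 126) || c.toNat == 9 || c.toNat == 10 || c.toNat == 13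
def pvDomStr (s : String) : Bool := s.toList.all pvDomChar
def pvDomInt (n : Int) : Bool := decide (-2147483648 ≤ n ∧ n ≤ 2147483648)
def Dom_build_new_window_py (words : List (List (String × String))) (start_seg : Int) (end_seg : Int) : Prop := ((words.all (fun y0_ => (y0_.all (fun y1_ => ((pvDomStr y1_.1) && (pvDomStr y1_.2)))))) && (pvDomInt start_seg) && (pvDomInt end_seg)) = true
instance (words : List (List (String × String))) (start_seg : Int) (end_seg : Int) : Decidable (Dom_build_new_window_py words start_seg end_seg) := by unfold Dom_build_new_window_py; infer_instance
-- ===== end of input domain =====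

-- B replaces A's single stateful loop by an annotate-then-filter decomposition (same cost); return values proved equal.

-- ===== PORT A =====
-- t = str(w.get('word') or '') — values are strings, so str() is identity and the
-- try/except never fires; `x or ''` on an Option String/empty string is getD "".
def pvWordText (w : List (String × String)) : String :=
  ((PySem.Dict.mk w).get? "word").getD ""

-- the for-loop of A over enumerate(words): state = (seg_idx, new_window-accumulator)
def pvALoop (start_seg end_seg : Int) :
    List (Int × List (String × String)) → Int → List (Int × String × Int) → List (Int × String × Int)
  | [], _, acc => acc
  | (wi, w) :: rest, seg, acc =>
    let t := pvWordText w
    if t = "\n" then pvALoop start_seg end_seg rest (seg + 1) acc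
    else if start_seg ≤ seg ∧ seg ≤ end_seg then
      pvALoop start_seg end_seg rest seg (acc ++ [(wi, t, seg)])
    else pvALoop start_seg end_seg rest seg acc

def build_new_window_py (words : List (List (String × String))) (start_seg : Int) (end_seg : Int) : (List (Int × String × Int)) × String :=
  let new_window := pvALoop start_seg end_seg (PySem.List.enumerate words) 0 []
  let new_transcript := PySem.Str.join " "
    ((new_window.filter (fun x => x.2.1 != "" && !(PySem.Str.strIsspace x.2.1))).map (fun x => x.2.1))
  (new_window, new_transcript)

-- ===== PORT B =====
-- phase-1 scan of B: each word's segment = running count of newline texts before it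
def pvSegScan : List String → Int → List Int
  | [], _ => []
  | t :: ts, acc => acc :: pvSegScan ts (acc + if t = "\n" then 1 else 0)

def build_new_window_py_alt (words : List (List (String × String))) (start_seg : Int) (end_seg : Int) : (List (Int × String × Int)) × String :=
  let texts := words.map pvWordText
  let segs := pvSegScan texts 0
  let new_window :=
    ((PySem.List.enumerate (texts.zip segs)).filter
        (fun p => p.2.1 != "\n" && decide (start_seg ≤ p.2.2) && decide (p.2.2 ≤ end_seg))).map
      (fun p => (p.1, p.2.1, p.2.2))
  let new_transcript := PySem.Str.join " "
    ((new_window.filter (fun x => x.2.1 != "" && !(PySem.Str.strIsspace x.2.1))).map (fun x => x.2.1))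
  (new_window, new_transcript)

-- ===== PRECONDITION & SPEC =====
def Spec_build_new_window_py (words : List (List (String × String))) (start_seg : Int) (end_seg : Int) (out : (List (Int × String × Int)) × String) : Prop := out = build_new_window_py_alt words start_seg end_seg
instance (words : List (List (String × String))) (start_seg : Int) (end_seg : Int) (out : (List (Int × String × Int)) × String) : Decidable (Spec_build_new_window_py words start_seg end_seg out) := by unfold Spec_build_new_window_py; infer_instance

-- ===== CLAIM (what is proved, stated in full; the proofs are below) =====
def Claim_equal_build_new_window_py : Prop := ∀ (words : List (List (String × String))) (start_seg : Int) (end_seg : Int), Dom_build_new_window_py words start_seg end_seg → Spec_build_new_window_py words start_seg end_seg (build_new_window_py words start_seg end_seg)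

-- ===== LEMMAS AND PROOFS =====
-- A's loop from any index/seg/accumulator equals B's annotate-then-filter pipeline from the same point.
theorem pvLoop_eq (start_seg end_seg : Int) :
    ∀ (ws : List (List (String × String))) (wi seg : Int) (acc : List (Int × String × Int)),
      pvALoop start_seg end_seg (PySem.List.enumerate ws wi) seg acc
        = acc ++ ((PySem.List.enumerate ((ws.map pvWordText).zip (pvSegScan (ws.map pvWordText) seg)) wi).filter
              (fun p => p.2.1 != "\n" && decide (start_seg ≤ p.2.2) && decide (p.2.2 ≤ end_seg))).map
            (fun p => (p.1, p.2.1, p.2.2))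
  | [], wi, seg, acc => by
      simp [PySem.List.enumerate_nil, pvALoop, pvSegScan]
  | w :: ws, wi, seg, acc => by
      rw [PySem.List.enumerate_cons]
      simp only [List.map_cons, pvSegScan, List.zip_cons_cons, PySem.List.enumerate_cons,
        List.filter_cons, pvALoop]
      by_cases hnl : pvWordText w = "\n"
      · have hc : ((pvWordText w != "\n" && decide (start_seg ≤ seg)) && decide (seg ≤ end_seg)) = false := by
          simp [hnl]
        rw [if_pos hnl, hc]
        simp only [Bool.false_eq_true, if_false, if_pos hnl]
        exact pvLoop_eq start_seg end_seg ws (wi + 1) (seg + 1) acc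
      · rw [if_neg hnl]
        by_cases hrng : start_seg ≤ seg ∧ seg ≤ end_seg
        · have hc : ((pvWordText w != "\n" && decide (start_seg ≤ seg)) && decide (seg ≤ end_seg)) = true := by
            simp [hnl, hrng.1, hrng.2]
          rw [if_pos hrng, hc]
          simp only [if_true, List.map_cons, if_neg hnl, add_zero]
          rw [pvLoop_eq start_seg end_seg ws (wi + 1) seg (acc ++ [(wi, pvWordText w, seg)])]
          simp
        · have hc : ((pvWordText w != "\n" && decide (start_seg ≤ seg)) && decide (seg ≤ end_seg)) = false := by
            rcases (not_and_or.mp hrng) with h | h <;> simp [h]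
          rw [if_neg hrng, hc]
          simp only [Bool.false_eq_true, if_false, if_neg hnl, add_zero]
          exact pvLoop_eq start_seg end_seg ws (wi + 1) seg acc

-- ===== VERDICT (by name: the statement is the Claim_ definition above) =====
theorem build_new_window_py_spec : Claim_equal_build_new_window_py := by
  intro words start_seg end_seg _
  unfold Spec_build_new_window_py build_new_window_py build_new_window_py_alt
  have h := pvLoop_eq start_seg end_seg words 0 0 []
  simp only [List.nil_append] at h
  rw [h]
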